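-- pv_equiv track=rewrite | github.com/schiob/TestingSistemas | ago-dic-2021/JESUS SALVADOR DE LA CRUZ DAVILA/PRACTICA_3/lista_numeros.py | lista_de_numeros
-- ===== SOURCE A (Python) =====
-- def lista_de_numeros(numeros):
--     positivos = 0
--     negativos = 0
--     pares = 0
--     impares = 0
--
--     for n in numeros:
--         if n > 0:
--             positivos += 1
--         elif n < 0:
--             negativos += 1
--         if n % 2 == 0:
--             pares +=1
--         elif n % 2 == 1:
--             impares += 1
--     return f'numero(s) positivo(s): {positivos}\nnumero(s) negativo(s): {negativos}\nnumero(s) par(es): {pares}\nnumero(s) impar(es): {impares}'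
-- ===== SOURCE B (Python) =====
-- def lista_de_numeros(numeros):
--     positivos = sum(1 for n in numeros if n > 0)
--     negativos = sum(1 for n in numeros if n < 0)
--     pares = sum(1 for n in numeros if n % 2 == 0)
--     impares = sum(1 for n in numeros if n % 2 == 1)
--     return f'numero(s) positivo(s): {positivos}\nnumero(s) negativo(s): {negativos}\nnumero(s) par(es): {pares}\nnumero(s) impar(es): {impares}'
-- ===== Notes on version B (the rewrite author's own statement) =====
-- stated objective: simpler
-- what changed: One stateful loop maintaining four counters is replaced by four independent counting passes written as generator-sum one-liners, with the same format string.
import Mathlib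
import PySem

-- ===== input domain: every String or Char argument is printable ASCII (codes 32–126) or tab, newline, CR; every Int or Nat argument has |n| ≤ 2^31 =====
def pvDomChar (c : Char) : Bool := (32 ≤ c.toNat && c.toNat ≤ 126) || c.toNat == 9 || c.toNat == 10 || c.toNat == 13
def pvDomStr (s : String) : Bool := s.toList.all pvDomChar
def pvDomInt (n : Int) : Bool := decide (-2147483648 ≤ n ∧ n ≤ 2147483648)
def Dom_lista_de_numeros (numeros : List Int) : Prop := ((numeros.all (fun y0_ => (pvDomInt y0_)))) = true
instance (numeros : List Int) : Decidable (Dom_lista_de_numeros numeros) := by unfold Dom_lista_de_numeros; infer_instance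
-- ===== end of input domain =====

-- B replaces A's single loop over four mutable counters by four independent
-- generator-sum counting passes (objective: simpler); same output string.

-- ===== PORT A =====
def lista_de_numeros (numeros : List Int) : String :=
  let st := numeros.foldl (fun (st : Int × Int × Int × Int) n =>
    let (positivos, negativos, pares, impares) := st
    let (positivos, negativos) :=
      if n > 0 then (positivos + 1, negativos)
      else if n < 0 then (positivos, negativos + 1)
      else (positivos, negativos)
    let (pares, impares) :=
      if PySem.Int.mod n 2 = 0 then (pares + 1, impares)
      else if PySem.Int.mod n 2 = 1 then (pares, impares + 1)
      else (pares, impares)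
    (positivos, negativos, pares, impares)) (0, 0, 0, 0)
  "numero(s) positivo(s): " ++ PySem.Int.toStr st.1 ++ "\nnumero(s) negativo(s): " ++ PySem.Int.toStr st.2.1 ++ "\nnumero(s) par(es): " ++ PySem.Int.toStr st.2.2.1 ++ "\nnumero(s) impar(es): " ++ PySem.Int.toStr st.2.2.2

-- ===== PORT B =====
def lista_de_numeros_alt (numeros : List Int) : String :=
  let positivos : Int := numeros.countP (fun n => n > 0)
  let negativos : Int := numeros.countP (fun n => n < 0)
  let pares : Int := numeros.countP (fun n => PySem.Int.mod n 2 = 0)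
  let impares : Int := numeros.countP (fun n => PySem.Int.mod n 2 = 1)
  "numero(s) positivo(s): " ++ PySem.Int.toStr positivos ++ "\nnumero(s) negativo(s): " ++ PySem.Int.toStr negativos ++ "\nnumero(s) par(es): " ++ PySem.Int.toStr pares ++ "\nnumero(s) impar(es): " ++ PySem.Int.toStr impares

-- ===== PRECONDITION & SPEC =====
def Spec_lista_de_numeros (numeros : List Int) (out : String) : Prop := out = lista_de_numeros_alt numeros
instance (numeros : List Int) (out : String) : Decidable (Spec_lista_de_numeros numeros out) := by unfold Spec_lista_de_numeros; infer_instance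

-- ===== CLAIM (what is proved, stated in full; the proofs are below) =====
def Claim_equal_lista_de_numeros : Prop := ∀ (numeros : List Int), Dom_lista_de_numeros numeros → Spec_lista_de_numeros numeros (lista_de_numeros numeros)


-- ===== LEMMAS AND PROOFS =====
theorem pv_fold_counts (l : List Int) : ∀ (a b c d : Int),
    l.foldl (fun (st : Int × Int × Int × Int) n =>
      let (positivos, negativos, pares, impares) := st
      let (positivos, negativos) :=
        if n > 0 then (positivos + 1, negativos)
        else if n < 0 then (positivos, negativos + 1)
        else (positivos, negativos)
      let (pares, impares) :=
        if PySem.Int.mod n 2 = 0 then (pares + 1, impares)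
        else if PySem.Int.mod n 2 = 1 then (pares, impares + 1)
        else (pares, impares)
      (positivos, negativos, pares, impares)) (a, b, c, d)
    = (a + l.countP (fun n => n > 0), b + l.countP (fun n => n < 0),
       c + l.countP (fun n => PySem.Int.mod n 2 = 0),
       d + l.countP (fun n => PySem.Int.mod n 2 = 1)) := by
  induction l with
  | nil => intro a b c d; simp [List.countP]
  | cons x xs ih =>
    intro a b c d
    simp only [List.foldl_cons, List.countP_cons]
    rw [ih]
    clear ih
    simp only [Prod.mk.injEq]
    split_ifs <;>
      simp only [decide_eq_true_eq] at * <;>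
      push_cast <;> omega


-- ===== VERDICT (by name: the statement is the Claim_ definition above) =====
theorem lista_de_numeros_spec : Claim_equal_lista_de_numeros := by
  intro numeros _
  unfold Spec_lista_de_numeros lista_de_numeros lista_de_numeros_alt
  rw [pv_fold_counts]
  simp
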